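-- pv_equiv track=rewrite | github.com/aubrey-zyx/Algorithms-Stanford | Course 1/Week 2/LocalMinimumInMatrix.py | get_min_cell
-- ===== SOURCE A (Python) =====
-- def get_min_cell(M, mid_row, mid_column, r1, r2, c1, c2):
--     min_cell = (mid_row, c1)
--     min_value = M[mid_row, c1]
--     for j in range(c1, c2):
--         if M[mid_row, j] < min_value:
--             min_cell = (mid_row, j)
--             min_value = M[mid_row, j]
--     for i in range(r1, r2):
--         if M[i, mid_column] < min_value:
--             min_cell = (i, mid_column)
--             min_value = M[i, mid_column]
--     return min_cell
-- ===== SOURCE B (Python) =====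
-- def get_min_cell(M, mid_row, mid_column, r1, r2, c1, c2):
--     candidates = [(mid_row, c1)]
--     candidates += [(mid_row, j) for j in range(c1, c2)]
--     candidates += [(i, mid_column) for i in range(r1, r2)]
--     # stable sort: the first cell (in scan order) with the minimal value ends up first
--     return sorted(candidates, key=lambda cell: M[cell])[0]
-- ===== Notes on version B (the rewrite author's own statement) =====
-- stated objective: alternative
-- what changed: Replaces A's running-minimum state machine threaded across two scans by building the full candidate cell list (base cell, row cells, column cells) and taking the head of a stable sort by cell value, whose stability reproduces A's keep-first tie-breaking.
import Mathlib
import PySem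

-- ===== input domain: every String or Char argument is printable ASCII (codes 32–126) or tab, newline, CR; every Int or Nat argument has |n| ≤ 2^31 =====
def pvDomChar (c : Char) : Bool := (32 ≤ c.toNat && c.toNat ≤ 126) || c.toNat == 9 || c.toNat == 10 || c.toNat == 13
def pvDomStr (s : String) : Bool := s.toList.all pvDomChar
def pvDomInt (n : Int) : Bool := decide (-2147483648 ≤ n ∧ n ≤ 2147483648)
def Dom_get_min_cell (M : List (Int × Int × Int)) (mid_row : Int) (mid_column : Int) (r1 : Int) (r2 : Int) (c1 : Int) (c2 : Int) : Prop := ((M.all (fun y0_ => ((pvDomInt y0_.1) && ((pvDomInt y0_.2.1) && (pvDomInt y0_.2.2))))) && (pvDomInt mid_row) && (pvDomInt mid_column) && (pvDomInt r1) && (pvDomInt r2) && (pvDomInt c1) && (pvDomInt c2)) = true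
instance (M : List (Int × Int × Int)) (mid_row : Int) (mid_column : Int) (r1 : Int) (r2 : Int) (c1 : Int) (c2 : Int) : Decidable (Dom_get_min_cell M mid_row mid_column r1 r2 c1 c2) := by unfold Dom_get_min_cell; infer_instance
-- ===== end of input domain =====

-- ===== PORT A =====
-- B replaces A's running-minimum state machine threaded across the row and column scans
-- by a stable sort of the full candidate cell list by value, taking its head
-- (objective: alternative; stability gives A's keep-first tie-breaking).
-- M is a Python dict keyed by (row, col); pvLook is first-match association lookup
-- (exact for the duplicate-free lists a dict produces; Pre_ guarantees the key is present,
-- so the default value is never used on admitted inputs).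
def pvLook (M : List (Int × Int × Int)) (c : Int × Int) : Int :=
  ((M.find? (fun t => t.1 == c.1 && t.2.1 == c.2)).map (fun t => t.2.2)).getD 0

def pvHasKey (M : List (Int × Int × Int)) (c : Int × Int) : Bool :=
  M.any (fun t => t.1 == c.1 && t.2.1 == c.2)

def get_min_cell (M : List (Int × Int × Int)) (mid_row : Int) (mid_column : Int) (r1 : Int) (r2 : Int) (c1 : Int) (c2 : Int) : Int × Int :=
  let s0 : (Int × Int) × Int := ((mid_row, c1), pvLook M (mid_row, c1))
  let s1 := (PySem.List.pyRange c1 c2 1).foldl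
    (fun st j => if pvLook M (mid_row, j) < st.2 then ((mid_row, j), pvLook M (mid_row, j)) else st) s0
  let s2 := (PySem.List.pyRange r1 r2 1).foldl
    (fun st i => if pvLook M (i, mid_column) < st.2 then ((i, mid_column), pvLook M (i, mid_column)) else st) s1
  s2.1

-- ===== PORT B =====
def get_min_cell_alt (M : List (Int × Int × Int)) (mid_row : Int) (mid_column : Int) (r1 : Int) (r2 : Int) (c1 : Int) (c2 : Int) : Int × Int :=
  let candidates : List (Int × Int) :=
    (mid_row, c1) ::
      ((PySem.List.pyRange c1 c2 1).map (fun j => (mid_row, j)) ++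
       (PySem.List.pyRange r1 r2 1).map (fun i => (i, mid_column)))
  -- candidates is nonempty, so Python's [0] never raises; headD's default is unreachable
  (PySem.List.sorted candidates (fun cell => pvLook M cell) false).headD (0, 0)

-- ===== PRECONDITION & SPEC =====
-- Pre_ excludes exactly the inputs on which Python A raises KeyError: some scanned
-- (row, col) key is absent from the dict M.
def Pre_get_min_cell (M : List (Int × Int × Int)) (mid_row : Int) (mid_column : Int) (r1 : Int) (r2 : Int) (c1 : Int) (c2 : Int) : Prop :=
  pvHasKey M (mid_row, c1) = true ∧
  (∀ j ∈ PySem.List.pyRange c1 c2 1, pvHasKey M (mid_row, j) = true) ∧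
  (∀ i ∈ PySem.List.pyRange r1 r2 1, pvHasKey M (i, mid_column) = true)
instance (M : List (Int × Int × Int)) (mid_row : Int) (mid_column : Int) (r1 : Int) (r2 : Int) (c1 : Int) (c2 : Int) : Decidable (Pre_get_min_cell M mid_row mid_column r1 r2 c1 c2) := by unfold Pre_get_min_cell; infer_instance

def pvWitness_get_min_cell : (List (Int × Int × Int)) × Int × Int × Int × Int × Int × Int :=
  ([(0, 0, 5), (0, 1, 2), (1, 0, 1), (1, 1, 7)], 0, 1, 0, 2, 0, 2)

def Spec_get_min_cell (M : List (Int × Int × Int)) (mid_row : Int) (mid_column : Int) (r1 : Int) (r2 : Int) (c1 : Int) (c2 : Int) (out : Int × Int) : Prop := out = get_min_cell_alt M mid_row mid_column r1 r2 c1 c2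
instance (M : List (Int × Int × Int)) (mid_row : Int) (mid_column : Int) (r1 : Int) (r2 : Int) (c1 : Int) (c2 : Int) (out : Int × Int) : Decidable (Spec_get_min_cell M mid_row mid_column r1 r2 c1 c2 out) := by unfold Spec_get_min_cell; infer_instance

-- ===== CLAIM (what is proved, stated in full; the proofs are below) =====
def Claim_equal_get_min_cell : Prop := ∀ (M : List (Int × Int × Int)) (mid_row : Int) (mid_column : Int) (r1 : Int) (r2 : Int) (c1 : Int) (c2 : Int), Dom_get_min_cell M mid_row mid_column r1 r2 c1 c2 → Pre_get_min_cell M mid_row mid_column r1 r2 c1 c2 → Spec_get_min_cell M mid_row mid_column r1 r2 c1 c2 (get_min_cell M mid_row mid_column r1 r2 c1 c2)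

-- ===== LEMMAS AND PROOFS =====

-- keep-first running argmin (the common denominator both proofs reduce to)
def pvFirstMin (M : List (Int × Int × Int)) (b : Int × Int) (cells : List (Int × Int)) : Int × Int :=
  cells.foldl (fun best c => if pvLook M c < pvLook M best then c else best) b

-- A's running-(cell,value) fold computes the keep-first argmin together with its value.
theorem pv_fold_eq_firstMin (M : List (Int × Int × Int)) (cells : List (Int × Int)) :
    ∀ b : Int × Int,
      cells.foldl (fun st c => if pvLook M c < st.2 then (c, pvLook M c) else st) (b, pvLook M b)
        = (pvFirstMin M b cells, pvLook M (pvFirstMin M b cells)) := by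
  induction cells with
  | nil => intro b; simp [pvFirstMin]
  | cons c rest ih =>
    intro b
    simp only [List.foldl_cons, pvFirstMin]
    by_cases h : pvLook M c < pvLook M b
    · simpa [h] using ih c
    · simpa [h] using ih b

-- head of an insertBy step (stable insertion: x goes before the first strictly larger head)
theorem pv_insertBy_head (M : List (Int × Int × Int)) (x : Int × Int) (acc : List (Int × Int)) :
    (PySem.List.insertBy (fun a b => decide (pvLook M a < pvLook M b)) x acc).head?
      = some (match acc with
              | [] => x
              | a :: _ => if pvLook M x < pvLook M a then x else a) := by
  cases acc with
  | nil => simp [PySem.List.insertBy]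
  | cons a t =>
    simp only [PySem.List.insertBy]
    by_cases h : pvLook M x < pvLook M a <;> simp [h]

-- invariant of the insertion-sort fold: the head of the accumulator is the keep-first
-- running minimum of the seed head and the processed elements.
theorem pv_foldl_insertBy_head (M : List (Int × Int × Int)) :
    ∀ (l : List (Int × Int)) (a : Int × Int) (t : List (Int × Int)),
      ((l.foldl (fun acc x => PySem.List.insertBy (fun p q => decide (pvLook M p < pvLook M q)) x acc) (a :: t)).head?)
        = some (pvFirstMin M a l) := by
  intro l
  induction l with
  | nil => intro a t; simp [pvFirstMin]
  | cons x l ih =>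
    intro a t
    simp only [List.foldl_cons]
    have hh := pv_insertBy_head M x (a :: t)
    rcases hacc : PySem.List.insertBy (fun p q => decide (pvLook M p < pvLook M q)) x (a :: t) with _ | ⟨h, t'⟩
    · rw [hacc] at hh; simp at hh
    · rw [hacc] at hh
      simp only [List.head?_cons, Option.some.injEq] at hh
      rw [ih h t']
      simp only [pvFirstMin, List.foldl_cons]
      rw [← hh]

-- head of the stable sort of a nonempty list = keep-first running argmin of the list
theorem pv_sorted_head (M : List (Int × Int × Int)) (b : Int × Int) (rest : List (Int × Int)) :
    (PySem.List.sorted (b :: rest) (fun cell => pvLook M cell) false).headD (0, 0)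
      = pvFirstMin M b rest := by
  have hs : PySem.List.sorted (b :: rest) (fun cell => pvLook M cell) false
      = rest.foldl (fun acc x => PySem.List.insertBy (fun p q => decide (pvLook M p < pvLook M q)) x acc) [b] := by
    rw [PySem.List.sorted_eq_foldl_insertBy]
    simp [PySem.List.insertBy]
  have hh := pv_foldl_insertBy_head M rest b []
  rw [hs]
  rcases hres : rest.foldl (fun acc x => PySem.List.insertBy (fun p q => decide (pvLook M p < pvLook M q)) x acc) [b] with _ | ⟨h, t⟩
  · rw [hres] at hh; simp at hh
  · rw [hres] at hh; simp only [List.head?_cons, Option.some.injEq] at hh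
    simpa using hh

theorem pv_fold_map (M : List (Int × Int × Int)) (g : Int → Int × Int) (l : List Int) (b : Int × Int) :
    l.foldl (fun st j => if pvLook M (g j) < st.2 then (g j, pvLook M (g j)) else st) (b, pvLook M b)
      = (pvFirstMin M b (l.map g), pvLook M (pvFirstMin M b (l.map g))) := by
  rw [← pv_fold_eq_firstMin]; simp [List.foldl_map]

theorem get_min_cell_eq (M : List (Int × Int × Int)) (mid_row mid_column r1 r2 c1 c2 : Int) :
    get_min_cell M mid_row mid_column r1 r2 c1 c2 = get_min_cell_alt M mid_row mid_column r1 r2 c1 c2 := by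
  unfold get_min_cell get_min_cell_alt
  rw [pv_sorted_head]
  have hrow := pv_fold_map M (fun j => (mid_row, j)) (PySem.List.pyRange c1 c2 1) (mid_row, c1)
  have hcol := pv_fold_map M (fun i => (i, mid_column)) (PySem.List.pyRange r1 r2 1)
    (pvFirstMin M (mid_row, c1) ((PySem.List.pyRange c1 c2 1).map (fun j => (mid_row, j))))
  simp only [hrow, hcol]
  simp [pvFirstMin, List.foldl_append]

-- ===== VERDICT (by name: the statement is the Claim_ definition above) =====
theorem get_min_cell_spec : Claim_equal_get_min_cell := by
  intro M mr mc r1 r2 c1 c2 _ _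
  exact get_min_cell_eq M mr mc r1 r2 c1 c2
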